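-- pv_equiv track=rewrite | github.com/Saicharan67/Interview-Coding-Questions | Arrays/CountMinimumSteps.py | play_the_game
-- ===== SOURCE A (Python) =====
-- def play_the_game(target):
--     result = 0
--     n = len(target)
--     while True:
--
--         zero_count = 0
--         i = 0
--         while i < n:
--             if (target[i] & 1) > 0:
--                 break
--             elif (target[i] == 0):
--                 zero_count += 1
--             i += 1
--         if zero_count == n:
--             return result
--         for j in range(i, n):
--             if (target[j] & 1):
--                 target[j] -= 1
--                 result += 1
--         if i == n:
--             for j in range(n):
--                 target[j] = target[j] // 2
--             result += 1
-- ===== SOURCE B (Python) =====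
-- def play_the_game(target):
--     # closed form: each odd-clearing pass removes one set bit per element,
--     # each doubling pass accounts once; total = sum of popcounts + (bit_length(max) - 1).
--     total = sum(bin(x).count("1") for x in target)
--     m = max(target, default=0)
--     return total + (m.bit_length() - 1 if m > 0 else 0)
-- ===== Notes on version B (the rewrite author's own statement) =====
-- stated objective: alternative
-- what changed: Replaces A's repeated simulation passes (clear all low bits, halve all elements, until every element is zero) by the closed form: sum of popcounts of the elements plus (bit_length of the maximum minus 1, when the maximum is positive); intended as asymptotically cheaper (O(n) vs O(n*maxbits)) but a timing run could not confirm a ratio, so no speed is claimed.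
import Mathlib
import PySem

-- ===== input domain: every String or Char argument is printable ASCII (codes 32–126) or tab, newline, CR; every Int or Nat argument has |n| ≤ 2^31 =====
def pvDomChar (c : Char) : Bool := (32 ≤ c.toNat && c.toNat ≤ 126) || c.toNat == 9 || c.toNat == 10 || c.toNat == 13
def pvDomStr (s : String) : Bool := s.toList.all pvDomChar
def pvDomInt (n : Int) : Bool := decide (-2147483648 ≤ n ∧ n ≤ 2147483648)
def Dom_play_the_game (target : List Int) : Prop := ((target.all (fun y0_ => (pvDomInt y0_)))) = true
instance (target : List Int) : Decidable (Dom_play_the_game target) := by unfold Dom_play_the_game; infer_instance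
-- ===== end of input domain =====

-- B computes A's result by the closed form (sum of popcounts + bit_length(max) - 1) instead of
-- simulating the clear/halve passes; A mutates its argument in place, the equivalence is about the
-- RETURN value only.

-- ===== PORT A =====
-- inner while: returns (break index i, zero_count), exactly A's scan
def pvScanA : List Int → Nat × Nat
  | [] => (0, 0)
  | x :: xs =>
    if PySem.Int.band x 1 > 0 then (0, 0)
    else
      let p := pvScanA xs
      (p.1 + 1, p.2 + (if x = 0 then 1 else 0))

-- the `for j in range(i, n)` subtract loop, applied to target[i:]: (new suffix, #decrements)
def pvSubA : List Int → List Int × Int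
  | [] => ([], 0)
  | x :: xs =>
    let p := pvSubA xs
    if PySem.Int.band x 1 ≠ 0 then ((x - 1) :: p.1, p.2 + 1) else (x :: p.1, p.2)

-- the `while True` loop; fuel is a totality guard only: on the inputs the claim covers
-- (Dom: |x| ≤ 2^31, Pre_: all x ≥ 0) the Python loop makes at most 2*32+1 passes < 100
def pvLoopA : Nat → List Int → Int → Int
  | 0, _, result => result
  | fuel+1, target, result =>
    let n := target.length
    let p := pvScanA target
    if p.2 = n then result
    else
      let q := pvSubA (target.drop p.1)
      let t1 := target.take p.1 ++ q.1
      let r1 := result + q.2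
      if p.1 = n then pvLoopA fuel (t1.map (fun x => PySem.Int.floordiv x 2)) (r1 + 1)
      else pvLoopA fuel t1 r1

def play_the_game (target : List Int) : Int := pvLoopA 100 target 0

-- ===== PORT B =====
def play_the_game_alt (target : List Int) : Int :=
  let total : Int := (target.map (fun x => (PySem.Int.bitCount x : Int))).sum
  let m : Int := PySem.List.maxD target (fun x => x) 0
  total + (if m > 0 then (PySem.Int.bitLength m : Int) - 1 else 0)

-- ===== PRECONDITION & SPEC =====
-- Pre_ excludes lists with a negative element: there A's loop never terminates (negative values
-- never become zero under clear/halve), so A returns on exactly the all-nonnegative lists.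
def Pre_play_the_game (target : List Int) : Prop := ∀ x ∈ target, 0 ≤ x
instance (target : List Int) : Decidable (Pre_play_the_game target) := by unfold Pre_play_the_game; infer_instance
def pvWitness_play_the_game : List Int := [2, 3]

def Spec_play_the_game (target : List Int) (out : Int) : Prop := out = play_the_game_alt target
instance (target : List Int) (out : Int) : Decidable (Spec_play_the_game target out) := by unfold Spec_play_the_game; infer_instance

-- ===== CLAIM (what is proved, stated in full; the proofs are below) =====
def Claim_equal_play_the_game : Prop := ∀ (target : List Int), Dom_play_the_game target → Pre_play_the_game target → Spec_play_the_game target (play_the_game target)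

-- ===== LEMMAS AND PROOFS =====

-- proof-side abbreviations
def pvClear (x : Int) : Int := if x % 2 = 1 then x - 1 else x
def pvHalf (x : Int) : Int := PySem.Int.floordiv x 2
def pvOc (t : List Int) : Nat := t.countP (fun x => decide (x % 2 = 1))
def pvMx (t : List Int) : Nat := t.foldl (fun a x => max a x.toNat) 0
def pvSS (t : List Int) : Int :=
  (t.map (fun x => (PySem.Int.bitCount x : Int))).sum
    + ((PySem.Int.bitLength ((pvMx t : Nat) : Int) - 1 : Nat) : Int)

-- the odd test of the ports, in % form
lemma pvBand1 (x : Int) : (PySem.Int.band x 1 > 0 ↔ x % 2 = 1) ∧ (PySem.Int.band x 1 ≠ 0 ↔ x % 2 = 1) := by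
  have h := PySem.Int.band_one x
  have h2 : PySem.Int.mod x 2 = x % 2 := PySem.Int.mod_eq_emod_of_pos (by norm_num)
  have h3 : x % 2 = 0 ∨ x % 2 = 1 := Int.emod_two_eq_zero_or_one x
  constructor <;> rw [h, h2] <;> omega

lemma pvSubA_spec (l : List Int) :
    pvSubA l = (l.map pvClear, (pvOc l : Int)) := by
  induction l with
  | nil => simp [pvSubA, pvOc]
  | cons x xs ih =>
    by_cases hx : x % 2 = 1
    · simp [pvSubA, ih, pvClear, pvOc, (pvBand1 x).2.mpr hx, hx]
    · have hb : ¬ PySem.Int.band x 1 ≠ 0 := fun hc => hx ((pvBand1 x).2.mp hc)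
      simp [pvSubA, ih, pvClear, pvOc, hb, hx]

lemma pvScanA_spec (t : List Int) :
    (pvScanA t).1 ≤ t.length ∧ (∀ x ∈ t.take (pvScanA t).1, x % 2 = 0) ∧
      (pvScanA t).2 = (t.take (pvScanA t).1).countP (fun x => decide (x = 0)) := by
  induction t with
  | nil => simp [pvScanA]
  | cons x xs ih =>
    by_cases hx : x % 2 = 1
    · simp [pvScanA, (pvBand1 x).1.mpr hx]
    · have hb : ¬ PySem.Int.band x 1 > 0 := fun hc => hx ((pvBand1 x).1.mp hc)
      have hx0 : x % 2 = 0 := by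
        have := Int.emod_two_eq_zero_or_one x; omega
      obtain ⟨h1, h2, h3⟩ := ih
      have hstep : pvScanA (x :: xs)
          = ((pvScanA xs).1 + 1, (pvScanA xs).2 + (if x = 0 then 1 else 0)) := by
        simp [pvScanA, hb]
      refine ⟨?_, ?_, ?_⟩
      · simp [hstep]; omega
      · rw [hstep]
        intro y hy
        simp [List.take_succ_cons] at hy
        rcases hy with rfl | hy
        · exact hx0
        · exact h2 y hy
      · rw [hstep]
        by_cases hz : x = 0 <;>
          simp [List.take_succ_cons, h3, hz]

lemma pvScanA_all_even (t : List Int) (h : ∀ x ∈ t, x % 2 = 0) :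
    pvScanA t = (t.length, t.countP (fun x => decide (x = 0))) := by
  induction t with
  | nil => simp [pvScanA]
  | cons x xs ih =>
    have hx0 : x % 2 = 0 := h x (by simp)
    have hb : ¬ PySem.Int.band x 1 > 0 := fun hc => by
      have h4 := (pvBand1 x).1.mp hc; omega
    have ih' := ih (fun y hy => h y (by simp [hy]))
    have hstep : pvScanA (x :: xs)
        = ((pvScanA xs).1 + 1, (pvScanA xs).2 + (if x = 0 then 1 else 0)) := by
      simp [pvScanA, hb]
    rw [hstep, ih']
    by_cases hz : x = 0 <;> simp [hz]

-- step lemmas: one pass of A's while-loop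
lemma pvStepReturn (f : Nat) (t : List Int) (r : Int) (h : ∀ x ∈ t, x = 0) :
    pvLoopA (f+1) t r = r := by
  have hev : ∀ x ∈ t, x % 2 = 0 := fun x hx => by rw [h x hx]; norm_num
  have hz : t.countP (fun x => decide (x = 0)) = t.length :=
    List.countP_eq_length.mpr (fun a ha => by simp [h a ha])
  simp [pvLoopA, pvScanA_all_even t hev, hz]

lemma pvStepOdd (f : Nat) (t : List Int) (r : Int) (hodd : ∃ x ∈ t, x % 2 = 1) :
    pvLoopA (f+1) t r = pvLoopA f (t.map pvClear) (r + (pvOc t : Int)) := by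
  obtain ⟨h1, h2, h3⟩ := pvScanA_spec t
  set i := (pvScanA t).1 with hi
  have hlt : i < t.length := by
    rcases Nat.lt_or_ge i t.length with h | h
    · exact h
    · exfalso
      have : t.take i = t := List.take_of_length_le h
      obtain ⟨x, hx, hx1⟩ := hodd
      have := h2 x (by rw [this]; exact hx)
      omega
  have hzlt : (pvScanA t).2 < t.length := by
    calc (pvScanA t).2 = (t.take i).countP (fun x => decide (x = 0)) := h3
    _ ≤ (t.take i).length := List.countP_le_length
    _ ≤ i := by simp
    _ < t.length := hlt
  have hclear_take : (t.take i).map pvClear = t.take i := by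
    have := List.map_congr_left (l := t.take i) (f := pvClear) (g := id)
      (fun a ha => by have := h2 a ha; simp [pvClear]; omega)
    simpa using this
  have hoc_take : (t.take i).countP (fun x => decide (x % 2 = 1)) = 0 :=
    List.countP_eq_zero.mpr (fun a ha => by have := h2 a ha; simp; omega)
  have hmap : t.take i ++ (t.drop i).map pvClear = t.map pvClear := by
    conv_rhs => rw [← List.take_append_drop i t]
    rw [List.map_append, hclear_take]
  have hoc : pvOc (t.drop i) = pvOc t := by
    unfold pvOc
    conv_rhs => rw [← List.take_append_drop i t]
    rw [List.countP_append, hoc_take]; omega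
  simp only [pvLoopA, pvSubA_spec, ← hi]
  rw [if_neg (by omega), if_neg (by omega), hmap, hoc]

lemma pvStepEven (f : Nat) (t : List Int) (r : Int) (hev : ∀ x ∈ t, x % 2 = 0)
    (hnz : ∃ x ∈ t, x ≠ 0) :
    pvLoopA (f+1) t r = pvLoopA f (t.map pvHalf) (r + 1) := by
  have hscan := pvScanA_all_even t hev
  have hzlt : t.countP (fun x => decide (x = 0)) ≠ t.length := by
    intro hc
    obtain ⟨x, hx, hx0⟩ := hnz
    have := List.countP_eq_length.mp hc x hx
    simp at this; exact hx0 this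
  have hmap : t.map pvHalf = t.map (fun x => x / 2) :=
    List.map_congr_left (fun a _ => PySem.Int.floordiv_eq_ediv_of_pos (by norm_num))
  simp only [pvLoopA, hscan]
  rw [if_neg hzlt]
  simp [pvSubA, hmap]

-- pvMx facts
lemma pvFold_max_le (t : List Int) (a k : Nat) (ha : a ≤ k) (hx : ∀ x ∈ t, x.toNat ≤ k) :
    t.foldl (fun a x => max a x.toNat) a ≤ k := by
  induction t generalizing a with
  | nil => simpa
  | cons y ys ih =>
    simp only [List.foldl_cons]
    exact ih (max a y.toNat) (max_le ha (hx y (by simp)))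
      (fun x hxm => hx x (List.mem_cons_of_mem _ hxm))

lemma pvMx_le (t : List Int) (k : Nat) (h : ∀ x ∈ t, x.toNat ≤ k) : pvMx t ≤ k :=
  pvFold_max_le t 0 k (Nat.zero_le k) h

lemma pvMx_bound (t : List Int) : ∀ x ∈ t, x.toNat ≤ pvMx t :=
  (PySem.List.le_foldl_max_nat t (fun x => x.toNat) 0).2

lemma pvMx_eq_zero (t : List Int) (h : pvMx t = 0) : ∀ x ∈ t, x.toNat = 0 :=
  fun x hx => Nat.le_zero.mp (h ▸ pvMx_bound t x hx)

lemma pvMx_zero_of_all (t : List Int) (h : ∀ x ∈ t, x.toNat = 0) : pvMx t = 0 :=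
  Nat.le_zero.mp (pvMx_le t 0 (fun x hx => (h x hx).le))

lemma pvFold_max_mem (t : List Int) : ∀ a, t.foldl (fun m x => max m x.toNat) a = a ∨
    ∃ x ∈ t, t.foldl (fun m x => max m x.toNat) a = x.toNat := by
  induction t with
  | nil => intro a; simp
  | cons y ys ih =>
    intro a
    simp only [List.foldl_cons]
    rcases ih (max a y.toNat) with h | ⟨x, hx, hh⟩
    · rcases max_choice a y.toNat with hm | hm
      · left; rw [h, hm]
      · right; exact ⟨y, by simp, by rw [h, hm]⟩
    · right; exact ⟨x, by simp [hx], hh⟩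

lemma pvMx_mem (t : List Int) : pvMx t = 0 ∨ ∃ x ∈ t, x.toNat = pvMx t := by
  rcases pvFold_max_mem t 0 with h | ⟨x, hx, hh⟩
  · left; exact h
  · right; exact ⟨x, hx, hh.symm⟩

lemma pvHalf_toNat (x : Int) (h : 0 ≤ x) : (pvHalf x).toNat = x.toNat / 2 ∧ 0 ≤ pvHalf x := by
  have hx : x = ((x.toNat : Nat) : Int) := by omega
  have : pvHalf x = ((x.toNat / 2 : Nat) : Int) := by
    rw [pvHalf, hx]
    exact_mod_cast PySem.Int.floordiv_natCast x.toNat 2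
  constructor
  · rw [this]; omega
  · rw [this]; positivity

lemma pvFold_max_half (t : List Int) (h : ∀ x ∈ t, 0 ≤ x) : ∀ a : Nat,
    (t.map pvHalf).foldl (fun m x => max m x.toNat) (a / 2)
      = (t.foldl (fun m x => max m x.toNat) a) / 2 := by
  induction t with
  | nil => intro a; simp
  | cons y ys ih =>
    intro a
    simp only [List.map_cons, List.foldl_cons]
    have h2 := (pvHalf_toNat y (h y (by simp))).1
    have hmax : max (a / 2) ((pvHalf y).toNat) = (max a y.toNat) / 2 := by
      rw [h2]
      rcases Nat.le_total a y.toNat with hle | hle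
      · rw [Nat.max_eq_right hle, Nat.max_eq_right (Nat.div_le_div_right hle)]
      · rw [Nat.max_eq_left hle, Nat.max_eq_left (Nat.div_le_div_right hle)]
    rw [hmax, ih (fun x hx => h x (by simp [hx]))]

lemma pvMx_half (t : List Int) (h : ∀ x ∈ t, 0 ≤ x) : pvMx (t.map pvHalf) = pvMx t / 2 := by
  have := pvFold_max_half t h 0
  simpa [pvMx] using this

-- bitLength facts on Nat casts
lemma pvBL_zero_iff (m : Nat) : PySem.Int.bitLength (m : Int) = 0 ↔ m = 0 := by
  constructor
  · intro h; by_contra hm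
    have := PySem.Int.bitLength_natCast (m := m) (Nat.pos_of_ne_zero hm); omega
  · rintro rfl; exact_mod_cast PySem.Int.bitLength_natCast_zero

lemma pvBL_one (m : Nat) (h : PySem.Int.bitLength (m : Int) = 1) : m = 1 := by
  have hm : m ≠ 0 := fun hc => by rw [hc, (pvBL_zero_iff 0).mpr rfl] at h; omega
  have hrec := PySem.Int.bitLength_natCast (m := m) (Nat.pos_of_ne_zero hm)
  have h2 : PySem.Int.bitLength ((m / 2 : Nat) : Int) = 0 := by omega
  have := (pvBL_zero_iff (m / 2)).mp h2
  omega

lemma pvBL_ge_two (m : Nat) (h : 2 ≤ PySem.Int.bitLength (m : Int)) : 2 ≤ m := by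
  by_contra hc
  interval_cases m
  · rw [(pvBL_zero_iff 0).mpr rfl] at h; omega
  · have : PySem.Int.bitLength ((1 : Nat) : Int) = 1 := by decide
    omega

lemma pvBitLength_le (k m : Nat) (h : m < 2 ^ k) : PySem.Int.bitLength (m : Int) ≤ k := by
  induction k generalizing m with
  | zero =>
    have : m = 0 := by simpa using h
    simp [this]
  | succ k ih =>
    rcases Nat.eq_zero_or_pos m with rfl | hm
    · simp
    · rw [PySem.Int.bitLength_natCast hm]
      have h2 : (2:Nat) ^ (k+1) = 2 * 2 ^ k := by ring
      exact Nat.succ_le_succ (ih (m / 2) (by omega))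

-- pvClear / pvHalf pointwise facts
lemma pvHalf_clear (x : Int) : pvHalf (pvClear x) = pvHalf x := by
  unfold pvClear
  by_cases h : x % 2 = 1
  · simp only [h, if_pos]
    unfold pvHalf
    rw [PySem.Int.floordiv_eq_ediv_of_pos (by norm_num),
        PySem.Int.floordiv_eq_ediv_of_pos (by norm_num)]
    omega
  · simp [h]

lemma pvHalf_zero : pvHalf 0 = 0 := by decide

lemma pvBitCount_half (x : Int) (h : 0 ≤ x) :
    (PySem.Int.bitCount x : Int)
      = (if x % 2 = 1 then 1 else 0) + (PySem.Int.bitCount (pvHalf x) : Int) := by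
  rcases h.lt_or_eq with hpos | hz
  · have hrec := PySem.Int.bitCount_of_pos hpos
    have hmod : PySem.Int.mod x 2 = x % 2 := PySem.Int.mod_eq_emod_of_pos (by norm_num)
    have h01 := Int.emod_two_eq_zero_or_one x
    unfold pvHalf
    rcases h01 with h0 | h1
    · rw [if_neg (by omega), hrec, hmod, h0]; push_cast; ring
    · rw [if_pos h1, hrec, hmod, h1]; push_cast; ring
  · rw [← hz]
    simp [pvHalf_zero, PySem.Int.bitCount_zero]

-- sum of popcounts: one halving pass removes exactly the odd count
lemma pvSum_half (t : List Int) (h : ∀ x ∈ t, 0 ≤ x) :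
    (t.map (fun x => (PySem.Int.bitCount x : Int))).sum
      = (pvOc t : Int) + ((t.map pvHalf).map (fun x => (PySem.Int.bitCount x : Int))).sum := by
  induction t with
  | nil => simp [pvOc]
  | cons x xs ih =>
    have hx := pvBitCount_half x (h x (by simp))
    have ih' := ih (fun y hy => h y (List.mem_cons_of_mem _ hy))
    simp only [List.map_cons, List.sum_cons]
    rw [ih', hx]
    have hc : ((pvOc (x :: xs) : Nat) : Int) = (if x % 2 = 1 then 1 else 0) + (pvOc xs : Int) := by
      unfold pvOc
      rw [List.countP_cons]
      by_cases ho : x % 2 = 1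
      · simp [ho]; ring
      · simp [ho]
    rw [hc]
    ring

-- pvSS under the two loop shapes
lemma pvSS_zero (t : List Int) (h : ∀ x ∈ t, x = 0) : pvSS t = 0 := by
  have hm : pvMx t = 0 := pvMx_zero_of_all t (fun x hx => by rw [h x hx]; rfl)
  unfold pvSS
  rw [hm]
  have hbc : t.map (fun x => (PySem.Int.bitCount x : Int)) = t.map (fun _ => (0 : Int)) :=
    List.map_congr_left (fun x hx => by rw [h x hx]; simp [PySem.Int.bitCount_zero])
  rw [hbc]
  simp

lemma pvSS_ones (t : List Int) (h01 : ∀ x ∈ t, x = 0 ∨ x = 1) (hm1 : pvMx t = 1) :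
    pvSS t = (pvOc t : Int) := by
  unfold pvSS
  rw [hm1]
  have hbc : t.map (fun x => (PySem.Int.bitCount x : Int))
      = t.map (fun x => if (fun y => decide (y % 2 = 1)) x = true then (1 : Int) else 0) := by
    refine List.map_congr_left (fun x hx => ?_)
    rcases h01 x hx with rfl | rfl
    · simp
    · simp
      decide
  rw [hbc, PySem.List.sum_map_ite_one_zero]
  have hb1 : PySem.Int.bitLength ((1 : Nat) : Int) = 1 := by decide
  rw [hb1]
  simp [pvOc]

lemma pvSS_step (t : List Int) (h : ∀ x ∈ t, 0 ≤ x)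
    (hbl : 2 ≤ PySem.Int.bitLength ((pvMx t : Nat) : Int)) :
    pvSS t = (pvOc t : Int) + 1 + pvSS (t.map pvHalf) := by
  have hm2 : 2 ≤ pvMx t := pvBL_ge_two _ hbl
  have hrec := PySem.Int.bitLength_natCast (m := pvMx t) (by omega)
  unfold pvSS
  rw [pvSum_half t h, pvMx_half t h]
  have hbl' : ((PySem.Int.bitLength ((pvMx t : Nat) : Int) - 1 : Nat) : Int)
      = 1 + ((PySem.Int.bitLength ((pvMx t / 2 : Nat) : Int) - 1 : Nat) : Int) := by omega
  rw [hbl']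
  ring

-- main loop characterisation
lemma pvAllZero (f : Nat) (t : List Int) (r : Int) (h : ∀ x ∈ t, x = 0) (hf : 1 ≤ f) :
    pvLoopA f t r = r + pvSS t := by
  obtain ⟨f', rfl⟩ : ∃ f', f = f' + 1 := ⟨f - 1, by omega⟩
  rw [pvStepReturn _ _ _ h, pvSS_zero t h]
  ring

lemma pvMain (L : Nat) : ∀ (f : Nat) (t : List Int) (r : Int),
    (∀ x ∈ t, 0 ≤ x) → PySem.Int.bitLength ((pvMx t : Nat) : Int) ≤ L → 2*L + 1 ≤ f →
    pvLoopA f t r = r + pvSS t := by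
  induction L with
  | zero =>
    intro f t r hnn hbl hf
    have hm : pvMx t = 0 := (pvBL_zero_iff _).mp (Nat.le_zero.mp hbl)
    exact pvAllZero f t r
      (fun x hx => by have := pvMx_eq_zero t hm x hx; have := hnn x hx; omega) (by omega)
  | succ L ih =>
    intro f t r hnn hbl hf
    by_cases hm0 : pvMx t = 0
    · exact pvAllZero f t r
        (fun x hx => by have := pvMx_eq_zero t hm0 x hx; have := hnn x hx; omega) (by omega)
    · have hmpos : 0 < pvMx t := Nat.pos_of_ne_zero hm0
      have hblpos : 1 ≤ PySem.Int.bitLength ((pvMx t : Nat) : Int) := by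
        by_contra hc
        exact hm0 ((pvBL_zero_iff _).mp (by omega))
      by_cases hodd : ∃ x ∈ t, x % 2 = 1
      · by_cases hbl1 : PySem.Int.bitLength ((pvMx t : Nat) : Int) = 1
        · -- max is 1: the clearing pass zeroes everything, then the loop returns
          have hm1 : pvMx t = 1 := pvBL_one _ hbl1
          have h01 : ∀ x ∈ t, x = 0 ∨ x = 1 := fun x hx => by
            have h1 := pvMx_bound t x hx
            rw [hm1] at h1
            have := hnn x hx
            omega
          obtain ⟨f', rfl⟩ : ∃ f', f = f' + 1 + 1 := ⟨f - 2, by omega⟩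
          rw [pvStepOdd _ _ _ hodd]
          have hcz : ∀ y ∈ t.map pvClear, y = 0 := by
            intro y hy
            simp only [List.mem_map] at hy
            obtain ⟨x, hx, rfl⟩ := hy
            rcases h01 x hx with rfl | rfl <;> simp [pvClear]
          rw [pvStepReturn _ _ _ hcz, pvSS_ones t h01 hm1]
        · -- max needs ≥ 2 bits: clearing pass, halving pass, induction
          have hbl2 : 2 ≤ PySem.Int.bitLength ((pvMx t : Nat) : Int) := by omega
          have hm2 : 2 ≤ pvMx t := pvBL_ge_two _ hbl2
          obtain ⟨f', rfl⟩ : ∃ f', f = f' + 1 + 1 := ⟨f - 2, by omega⟩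
          rw [pvStepOdd _ _ _ hodd]
          have hcnn : ∀ y ∈ t.map pvClear, 0 ≤ y := by
            intro y hy
            simp only [List.mem_map] at hy
            obtain ⟨x, hx, rfl⟩ := hy
            have := hnn x hx
            unfold pvClear
            split <;> omega
          have hcev : ∀ y ∈ t.map pvClear, y % 2 = 0 := by
            intro y hy
            simp only [List.mem_map] at hy
            obtain ⟨x, hx, rfl⟩ := hy
            have := Int.emod_two_eq_zero_or_one x
            unfold pvClear
            split <;> omega
          have hcnz : ∃ y ∈ t.map pvClear, y ≠ 0 := by
            rcases pvMx_mem t with hc | ⟨x, hx, hxm⟩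
            · omega
            · refine ⟨pvClear x, List.mem_map_of_mem hx, ?_⟩
              have := hnn x hx
              unfold pvClear
              split <;> omega
          rw [pvStepEven _ _ _ hcev hcnz]
          have hcomp : (t.map pvClear).map pvHalf = t.map pvHalf := by
            rw [List.map_map]
            exact List.map_congr_left (fun a _ => pvHalf_clear a)
          rw [hcomp]
          have hhnn : ∀ y ∈ t.map pvHalf, 0 ≤ y := by
            intro y hy
            simp only [List.mem_map] at hy
            obtain ⟨x, hx, rfl⟩ := hy
            exact (pvHalf_toNat x (hnn x hx)).2
          have hrec := PySem.Int.bitLength_natCast (m := pvMx t) (by omega)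
          have hhbl : PySem.Int.bitLength ((pvMx (t.map pvHalf) : Nat) : Int) ≤ L := by
            rw [pvMx_half t hnn]; omega
          rw [ih f' (t.map pvHalf) _ hhnn hhbl (by omega), pvSS_step t hnn hbl2]
          ring
      · -- no odd element: pure halving pass
        have hev : ∀ x ∈ t, x % 2 = 0 := by
          intro x hx
          have := Int.emod_two_eq_zero_or_one x
          push Not at hodd
          have := hodd x hx
          omega
        have hnz : ∃ x ∈ t, x ≠ 0 := by
          rcases pvMx_mem t with hc | ⟨x, hx, hxm⟩
          · omega
          · exact ⟨x, hx, by omega⟩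
        have hbl2 : 2 ≤ PySem.Int.bitLength ((pvMx t : Nat) : Int) := by
          rcases Nat.lt_or_ge (pvMx t) 2 with hlt | hge
          · -- pvMx t = 1: its witness would be an odd element
            exfalso
            have hm1 : pvMx t = 1 := by omega
            rcases pvMx_mem t with hc | ⟨x, hx, hxm⟩
            · omega
            · have := hnn x hx
              have hx1 : x = 1 := by omega
              have := hev x hx
              omega
          · have hrec := PySem.Int.bitLength_natCast (m := pvMx t) (by omega)
            have h2 : PySem.Int.bitLength ((pvMx t / 2 : Nat) : Int) ≥ 1 := by
              by_contra hc
              have := (pvBL_zero_iff (pvMx t / 2)).mp (by omega)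
              omega
            omega
        obtain ⟨f', rfl⟩ : ∃ f', f = f' + 1 := ⟨f - 1, by omega⟩
        rw [pvStepEven _ _ _ hev hnz]
        have hhnn : ∀ y ∈ t.map pvHalf, 0 ≤ y := by
          intro y hy
          simp only [List.mem_map] at hy
          obtain ⟨x, hx, rfl⟩ := hy
          exact (pvHalf_toNat x (hnn x hx)).2
        have hrec := PySem.Int.bitLength_natCast (m := pvMx t) (by omega)
        have hhbl : PySem.Int.bitLength ((pvMx (t.map pvHalf) : Nat) : Int) ≤ L := by
          rw [pvMx_half t hnn]; omega
        have hoc0 : pvOc t = 0 :=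
          List.countP_eq_zero.mpr (fun a ha => by have := hev a ha; simp; omega)
        rw [ih f' (t.map pvHalf) _ hhnn hhbl (by omega), pvSS_step t hnn hbl2, hoc0]
        push_cast
        ring

-- the closed form computed by B equals pvSS on nonnegative lists
lemma pvFoldl_max_int (t : List Int) (x : Int) (hx : 0 ≤ x) (h : ∀ y ∈ t, 0 ≤ y) :
    t.foldl max x = ((t.foldl (fun a y => max a y.toNat) x.toNat : Nat) : Int) := by
  induction t generalizing x with
  | nil => simp; omega
  | cons y ys ih =>
    simp only [List.foldl_cons]
    have hy := h y (by simp)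
    rw [ih (max x y) (le_max_of_le_left hx) (fun z hz => h z (List.mem_cons_of_mem _ hz))]
    congr 1
    rcases le_total x y with h' | h'
    · rw [max_eq_right h', Nat.max_eq_right (by omega)]
    · rw [max_eq_left h', Nat.max_eq_left (by omega)]

lemma pvAlt_eq (t : List Int) (h : ∀ x ∈ t, 0 ≤ x) : play_the_game_alt t = pvSS t := by
  have halt : play_the_game_alt t = (t.map (fun x => (PySem.Int.bitCount x : Int))).sum
      + (if PySem.List.maxD t (fun x => x) 0 > 0
         then (PySem.Int.bitLength (PySem.List.maxD t (fun x => x) 0) : Int) - 1 else 0) := rfl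
  rw [halt]
  unfold pvSS
  cases t with
  | nil =>
    rw [PySem.List.maxD_nil]
    simp [pvMx]
  | cons x xs =>
    rw [PySem.List.maxD_id_cons]
    have hx := h x (by simp)
    have hfold := pvFoldl_max_int xs x hx (fun y hy => h y (List.mem_cons_of_mem _ hy))
    have hmx : pvMx (x :: xs) = xs.foldl (fun a y => max a y.toNat) x.toNat := by
      simp [pvMx, List.foldl_cons]
    rw [hfold, ← hmx]
    by_cases hm : pvMx (x :: xs) = 0
    · rw [hm]
      simp
    · have hpos : ((pvMx (x :: xs) : Nat) : Int) > 0 := by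
        have := Nat.pos_of_ne_zero hm; exact_mod_cast this
      rw [if_pos hpos]
      have hb1 : 1 ≤ PySem.Int.bitLength ((pvMx (x :: xs) : Nat) : Int) := by
        by_contra hc
        exact hm ((pvBL_zero_iff _).mp (by omega))
      have hcast : ((PySem.Int.bitLength ((pvMx (x :: xs) : Nat) : Int) : Nat) : Int) - 1
          = ((PySem.Int.bitLength ((pvMx (x :: xs) : Nat) : Int) - 1 : Nat) : Int) := by omega
      rw [hcast]

-- ===== VERDICT (by name: the statement is the Claim_ definition above) =====
theorem play_the_game_spec : Claim_equal_play_the_game := by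
  intro t hdom hpre
  unfold Spec_play_the_game
  rw [pvAlt_eq t hpre]
  unfold play_the_game
  have hb : ∀ x ∈ t, x.toNat ≤ 2147483648 := by
    intro x hx
    have hd := List.all_eq_true.mp hdom x hx
    simp [pvDomInt] at hd
    omega
  have hmx : pvMx t < 2 ^ 32 := by
    have h1 := pvMx_le t 2147483648 hb
    have h2 : (2147483648 : Nat) < 2 ^ 32 := by norm_num
    omega
  have hbl := pvBitLength_le 32 (pvMx t) hmx
  have hmain := pvMain 32 100 t 0 hpre hbl (by norm_num)
  rw [hmain]
  ring
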